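-- pv_equiv track=rewrite | github.com/abekermsx/AdventOfCode2019 | Day4/Day4-1.py | is_possible_password
-- ===== SOURCE A (Python) =====
-- def is_possible_password(value):
--     s = str(value)
--
--     t = 0
--     for i in range(1, len(s)):
--         if s[i] < s[i-1]:
--             return 0
--
--         if s[i] == s[i-1]:
--             t = 1
--
--     return t
-- ===== SOURCE B (Python) =====
-- def is_possible_password(value):
--     s = str(value)
--     return 1 if sorted(s) == list(s) and len(set(s)) < len(s) else 0
-- ===== Notes on version B (the rewrite author's own statement) =====
-- stated objective: simpler
-- what changed: Replaces the indexed pairwise scan with early return and a flag by a one-line check: the string is non-decreasing iff it equals its sorted form, and (being non-decreasing) has an adjacent duplicate iff it has any duplicate (set smaller than list).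
import Mathlib
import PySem

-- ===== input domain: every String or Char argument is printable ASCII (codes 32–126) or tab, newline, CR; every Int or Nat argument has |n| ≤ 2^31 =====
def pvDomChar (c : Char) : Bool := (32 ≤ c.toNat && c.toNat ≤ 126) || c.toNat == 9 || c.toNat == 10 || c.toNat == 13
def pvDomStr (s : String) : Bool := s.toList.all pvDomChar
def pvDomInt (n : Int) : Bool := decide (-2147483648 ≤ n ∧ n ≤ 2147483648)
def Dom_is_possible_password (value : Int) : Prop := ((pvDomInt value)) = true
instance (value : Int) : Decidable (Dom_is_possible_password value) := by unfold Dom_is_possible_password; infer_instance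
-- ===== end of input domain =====

-- B replaces A's indexed scan (early return on a decrease, flag for an adjacent pair)
-- by "s equals sorted(s) and set(s) is smaller than s"; objective: simpler.

-- ===== PORT A =====
-- the loop 'for i in range(1, len(s))' visits adjacent pairs (s[i-1], s[i]);
-- state: prev = s[i-1], t = the flag
def pvALoop : List Char → Char → Int → Int
  | [], _, t => t
  | c :: cs, prev, t =>
    if c < prev then 0
    else pvALoop cs c (if c == prev then 1 else t)

def is_possible_password (value : Int) : Int :=
  match PySem.Int.toChars value with          -- s = str(value)
  | [] => 0
  | c :: cs => pvALoop cs c 0                 -- t = 0; final 'return t'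

-- ===== PORT B =====
def is_possible_password_alt (value : Int) : Int :=
  let s := PySem.Int.toChars value
  if PySem.List.sorted s (fun c => c) = s ∧
     PySem.Set.len (PySem.Set.ofList s) < (s.length : Int) then 1 else 0

-- ===== PRECONDITION & SPEC =====
def Spec_is_possible_password (value : Int) (out : Int) : Prop := out = is_possible_password_alt value
instance (value : Int) (out : Int) : Decidable (Spec_is_possible_password value out) := by unfold Spec_is_possible_password; infer_instance

-- ===== CLAIM (what is proved, stated in full; the proofs are below) =====
def Claim_equal_is_possible_password : Prop := ∀ (value : Int), Dom_is_possible_password value → Spec_is_possible_password value (is_possible_password value)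

-- ===== LEMMAS AND PROOFS =====

-- if the tail of the string is not non-decreasing, A's loop hits an early return 0
theorem pvALoop_not_pairwise (cs : List Char) (prev : Char) (t : Int)
    (h : ¬ (prev :: cs).Pairwise (· ≤ ·)) : pvALoop cs prev t = 0 := by
  induction cs generalizing prev t with
  | nil => exact absurd (by simp) h
  | cons c cs ih =>
    by_cases hlt : c < prev
    · simp [pvALoop, hlt]
    · have hpc : prev ≤ c := not_lt.mp hlt
      have htail : ¬ (c :: cs).Pairwise (· ≤ ·) := by
        intro hcc
        apply h
        refine List.pairwise_cons.mpr ⟨?_, hcc⟩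
        intro x hx
        rcases List.mem_cons.mp hx with rfl | hx'
        · exact hpc
        · exact le_trans hpc ((List.pairwise_cons.mp hcc).1 x hx')
      simp only [pvALoop, if_neg hlt]
      exact ih c _ htail

-- on a non-decreasing string, the loop returns 1 iff some character repeats
theorem pvALoop_pairwise (cs : List Char) (prev : Char) (t : Int)
    (h : (prev :: cs).Pairwise (· ≤ ·)) :
    pvALoop cs prev t = if (prev :: cs).Nodup then t else 1 := by
  induction cs generalizing prev t with
  | nil => simp [pvALoop]
  | cons c cs ih =>
    obtain ⟨hhead, htail⟩ := List.pairwise_cons.mp h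
    have hpc : prev ≤ c := hhead c (List.mem_cons_self ..)
    have hlt : ¬ c < prev := not_lt.mpr hpc
    by_cases heq : c = prev
    · subst heq
      simp only [pvALoop, if_neg hlt, beq_self_eq_true, if_true]
      rw [ih c 1 htail]
      have hnd : ¬ (c :: c :: cs).Nodup := by simp
      simp [hnd]
    · have hbe : (c == prev) = false := beq_eq_false_iff_ne.mpr heq
      simp only [pvALoop, if_neg hlt, hbe, Bool.false_eq_true, if_false]
      rw [ih c t htail]
      have hprevlt : prev < c := lt_of_le_of_ne hpc (Ne.symm heq)
      have hnotmem : prev ∉ c :: cs := by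
        intro hmem
        rcases List.mem_cons.mp hmem with rfl | hmem'
        · exact absurd rfl (Ne.symm heq)
        · exact absurd (lt_of_lt_of_le hprevlt ((List.pairwise_cons.mp htail).1 prev hmem'))
            (lt_irrefl prev)
      have : (prev :: c :: cs).Nodup ↔ (c :: cs).Nodup := by
        constructor
        · exact fun hn => hn.of_cons
        · exact fun hn => List.nodup_cons.mpr ⟨hnotmem, hn⟩
      simp only [this]

-- set(s) is smaller than s exactly when s has a duplicate
theorem pvLen_ofList_lt_iff (l : List Char) :
    ((PySem.Set.ofList l).length < l.length) ↔ ¬ l.Nodup := by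
  have hperm : (PySem.Set.ofList l : List Char).Perm l.dedup := by
    rw [List.perm_ext_iff_of_nodup (PySem.Set.nodup_ofList l) l.nodup_dedup]
    intro a
    rw [PySem.Set.mem_ofList, List.mem_dedup]
  have hlen : (PySem.Set.ofList l : List Char).length = l.dedup.length := hperm.length_eq
  have hsub : l.dedup.Sublist l := l.dedup_sublist
  constructor
  · intro hlt hnd
    rw [List.dedup_eq_self.mpr hnd] at hlen
    omega
  · intro hnd
    have hle : l.dedup.length ≤ l.length := hsub.length_le
    rcases lt_or_eq_of_le hle with h | h
    · omega
    · have heq : l.dedup = l := hsub.eq_of_length h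
      exact absurd (heq ▸ l.nodup_dedup) hnd

theorem pv_main (value : Int) :
    is_possible_password value = is_possible_password_alt value := by
  unfold is_possible_password is_possible_password_alt
  cases hs : PySem.Int.toChars value with
  | nil => simp
  | cons c cs =>
    simp only []
    by_cases hp : (c :: cs).Pairwise (· ≤ ·)
    · have hsorted : PySem.List.sorted (c :: cs) (fun c => c) = c :: cs :=
        PySem.List.sorted_eq_self_of_pairwise _ _ hp
      rw [pvALoop_pairwise cs c 0 hp]
      simp only [hsorted, true_and, PySem.Set.len]
      by_cases hnd : (c :: cs).Nodup
      · have : ¬ ((PySem.Set.ofList (c :: cs)).length < (c :: cs).length) := by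
          rw [pvLen_ofList_lt_iff]; simpa using hnd
        simp only [if_pos hnd]
        rw [if_neg (by exact_mod_cast this)]
      · have : (PySem.Set.ofList (c :: cs)).length < (c :: cs).length :=
          (pvLen_ofList_lt_iff _).mpr hnd
        simp only [if_neg hnd]
        rw [if_pos (by exact_mod_cast this)]
    · rw [pvALoop_not_pairwise cs c 0 hp]
      have hne : PySem.List.sorted (c :: cs) (fun c => c) ≠ c :: cs := by
        intro heq
        have := PySem.List.sorted_pairwise (c :: cs) (fun c => c)
        rw [heq] at this
        exact hp this
      rw [if_neg (by intro hc; exact hne hc.1)]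

-- ===== VERDICT (by name: the statement is the Claim_ definition above) =====
theorem is_possible_password_spec : Claim_equal_is_possible_password := by
  intro value _
  unfold Spec_is_possible_password
  exact pv_main value
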